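-- pv_equiv track=rewrite | github.com/SedemQuame/automated-web-search-and-filtering | utils.py | optimize_paragraphs
-- ===== SOURCE A (Python) =====
-- def optimize_paragraphs(paragraphs):
--     paragraphs = [p for p in paragraphs if p and p not in ["<br/>", ""]]
--     optimized_paragraphs = []
--     buffer = ""
--     for i in range(len(paragraphs)):
--         buffer += paragraphs[i] + " "
--         if len(buffer) >= 300:
--             optimized_paragraphs.append(buffer.strip())
--             buffer = ""
--         elif i == len(paragraphs) - 1:
--             optimized_paragraphs.append(buffer.strip())
--     return optimized_paragraphs
-- ===== SOURCE B (Python) =====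
-- def optimize_paragraphs(paragraphs):
--     ps = [p for p in paragraphs if p and p != "<br/>"]
--     if not ps:
--         return []
--     # stage 1: per-paragraph weights (paragraph length plus the trailing space A appends)
--     weights = [len(p) + 1 for p in ps]
--     # stage 2: absolute cut indices (exclusive chunk ends) where the running total reaches 300
--     cuts = []
--     acc = 0
--     for i, w in enumerate(weights):
--         acc += w
--         if acc >= 300:
--             cuts.append(i + 1)
--             acc = 0
--     if not cuts or cuts[-1] != len(ps):
--         cuts.append(len(ps))
--     # stage 3: materialise each chunk by slicing between consecutive cuts
--     out = []
--     start = 0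
--     for end in cuts:
--         out.append(" ".join(ps[start:end]).strip())
--         start = end
--     return out
-- ===== Notes on version B (the rewrite author's own statement) =====
-- stated objective: alternative
-- what changed: A makes one pass mutating a string buffer and flushing it in place; B is staged: it first maps each paragraph to its weight len(p)+1, then computes the list of absolute cut indices where the running weight reaches 300 (appending len(ps) for the trailing partial chunk), and finally materialises each chunk by slicing the paragraph list between consecutive cut indices and joining.
import Mathlib
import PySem

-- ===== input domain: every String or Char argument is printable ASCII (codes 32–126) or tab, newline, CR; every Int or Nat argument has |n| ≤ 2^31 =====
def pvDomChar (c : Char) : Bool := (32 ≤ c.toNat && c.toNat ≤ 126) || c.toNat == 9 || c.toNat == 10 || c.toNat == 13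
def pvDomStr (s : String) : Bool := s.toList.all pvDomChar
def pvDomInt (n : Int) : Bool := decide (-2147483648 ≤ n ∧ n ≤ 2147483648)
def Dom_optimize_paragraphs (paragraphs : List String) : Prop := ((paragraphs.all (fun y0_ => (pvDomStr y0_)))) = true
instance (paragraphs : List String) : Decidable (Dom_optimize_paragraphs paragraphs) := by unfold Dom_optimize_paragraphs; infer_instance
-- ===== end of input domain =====

-- B replaces A's single buffer-mutating pass by three staged passes: a weight list (len(p)+1 per
-- paragraph), a list of absolute cut indices where the running weight reaches 300 (plus a final
-- cut for the trailing partial chunk), and a slice-and-join pass between consecutive cuts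
-- (objective: alternative decomposition; same asymptotic cost).

-- ===== PORT A =====
-- loop 'for i in range(len(paragraphs))' over the filtered list, carrying the buffer;
-- the '[p]' case is i == len(paragraphs) - 1 (both branches there append buffer.strip()).
def pvLoopA : List String → List Char → List String
  | [], _ => []
  | [p], buf =>
      let b := buf ++ p.toList ++ [' ']
      if 300 ≤ b.length then [String.ofList (PySem.Chars.strip b)]
      else [String.ofList (PySem.Chars.strip b)]
  | p :: q :: rest, buf =>
      let b := buf ++ p.toList ++ [' ']
      if 300 ≤ b.length then String.ofList (PySem.Chars.strip b) :: pvLoopA (q :: rest) []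
      else pvLoopA (q :: rest) b

def optimize_paragraphs (paragraphs : List String) : List String :=
  -- 'p and p not in ["<br/>", ""]'
  pvLoopA (paragraphs.filter (fun p => decide (p ≠ "") && decide (¬ (p = "<br/>" ∨ p = "")))) []

-- ===== PORT B =====
-- stage 2: 'for i, w in enumerate(weights): acc += w; if acc >= 300: cuts.append(i+1); acc = 0'
def pvCutsB : List Nat → Nat → Nat → List Nat
  | [], _, _ => []
  | w :: ws, i, acc =>
      if 300 ≤ acc + w then (i + 1) :: pvCutsB ws (i + 1) 0
      else pvCutsB ws (i + 1) (acc + w)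

-- 'if not cuts or cuts[-1] != len(ps): cuts.append(len(ps))'
def pvFix (cuts : List Nat) (n : Nat) : List Nat :=
  if cuts.getLast? = some n then cuts else cuts ++ [n]

-- '" ".join(ps[start:end]).strip()'
def pvSliceJoin (ps : List String) (a b : Nat) : String :=
  String.ofList (PySem.Chars.strip
    (PySem.Chars.join [' '] ((PySem.List.slice ps (some (a : Int)) (some (b : Int))).map String.toList)))

-- stage 3: 'for end in cuts: out.append(" ".join(ps[start:end]).strip()); start = end'
def pvEmit (ps : List String) : List Nat → Nat → List String
  | [], _ => []
  | e :: rest, start => pvSliceJoin ps start e :: pvEmit ps rest e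

def optimize_paragraphs_alt (paragraphs : List String) : List String :=
  -- 'p and p != "<br/>"'
  let ps := paragraphs.filter (fun p => decide (p ≠ "") && decide (p ≠ "<br/>"))
  if ps.isEmpty then []
  else
    let w := ps.map (fun p => p.toList.length + 1)   -- stage 1: weights len(p)+1
    pvEmit ps (pvFix (pvCutsB w 0 0) ps.length) 0

-- ===== PRECONDITION & SPEC =====
def Spec_optimize_paragraphs (paragraphs : List String) (out : List String) : Prop := out = optimize_paragraphs_alt paragraphs
instance (paragraphs : List String) (out : List String) : Decidable (Spec_optimize_paragraphs paragraphs out) := by unfold Spec_optimize_paragraphs; infer_instance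

-- ===== CLAIM (what is proved, stated in full; the proofs are below) =====
def Claim_equal_optimize_paragraphs : Prop := ∀ (paragraphs : List String), Dom_optimize_paragraphs paragraphs → Spec_optimize_paragraphs paragraphs (optimize_paragraphs paragraphs)

-- ===== LEMMAS AND PROOFS =====

-- proof-side greedy chunker: the parts of the first chunk (running total starting at 'total')
-- and the remaining paragraphs; both programs are related to it
def pvTakeChunk : List String → Nat → List (List Char) × List String
  | [], _ => ([], [])
  | p :: rest, total =>
      if total < 300 then
        let r := pvTakeChunk rest (total + p.toList.length + 1)
        (p.toList :: r.1, r.2)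
      else ([], p :: rest)

lemma pvTakeChunk_snd_le (ps : List String) (t : Nat) :
    (pvTakeChunk ps t).2.length ≤ ps.length := by
  induction ps generalizing t with
  | nil => simp [pvTakeChunk]
  | cons p rest ih =>
      by_cases h : t < 300
      · simpa [pvTakeChunk, h] using Nat.le_succ_of_le (ih _)
      · simp [pvTakeChunk, h]

-- chunk-by-chunk reference: one output string per chunk
def pvLoopB : List String → List String
  | [] => []
  | p :: rest =>
      let c := pvTakeChunk (p :: rest) 0
      String.ofList (PySem.Chars.strip (PySem.Chars.join [' '] c.1)) :: pvLoopB c.2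
  termination_by ps => ps.length
  decreasing_by
    simp only [pvTakeChunk, if_pos (by omega : (0:Nat) < 300)]
    exact Nat.lt_succ_of_le (pvTakeChunk_snd_le _ _)

-- buffer contents of one chunk in A: each paragraph followed by a space
def pvFlatT (parts : List (List Char)) : List Char := (parts.map (· ++ [' '])).flatten

lemma pvFlatT_cons (x : List Char) (xs : List (List Char)) :
    pvFlatT (x :: xs) = x ++ [' '] ++ pvFlatT xs := by
  simp [pvFlatT]

lemma pvFlatT_eq_join (x : List Char) (xs : List (List Char)) :
    pvFlatT (x :: xs) = PySem.Chars.join [' '] (x :: xs) ++ [' '] := by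
  induction xs generalizing x with
  | nil => simp [pvFlatT, PySem.Chars.join, List.intercalate]
  | cons y ys ih =>
      rw [pvFlatT_cons, ih y]
      simp [PySem.Chars.join, List.intercalate]

lemma pvRstrip_append_space (s : List Char) :
    PySem.Chars.rstrip (s ++ [' ']) = PySem.Chars.rstrip s := by
  simp [PySem.Chars.rstrip, PySem.Chars.isspace]

lemma pvStrip_append_space (s : List Char) :
    PySem.Chars.strip (s ++ [' ']) = PySem.Chars.strip s := by
  induction s with
  | nil => decide
  | cons c t ih =>
      by_cases h : PySem.Chars.isspace c
      · simpa [PySem.Chars.strip, PySem.Chars.lstrip, List.dropWhile, h] using ih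
      · simp only [PySem.Chars.strip, PySem.Chars.lstrip, List.cons_append, List.dropWhile, h]
        exact pvRstrip_append_space (c :: t)

-- main invariant for A: running A's loop from buffer 'buf' (len < 300) emits first the chunk
-- the greedy chunker cuts at running total 'buf.length', then the remaining chunks
lemma pvMain (ps : List String) : ∀ buf : List Char, buf.length < 300 → ps ≠ [] →
    pvLoopA ps buf =
      String.ofList (PySem.Chars.strip (buf ++ pvFlatT (pvTakeChunk ps buf.length).1)) ::
        pvLoopB (pvTakeChunk ps buf.length).2 := by
  induction ps with
  | nil => intro _ _ h; exact absurd rfl h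
  | cons p tail ih =>
    intro buf hb _
    have hpt : p.toList.length = p.length := by simp
    match tail with
    | [] =>
        simp [pvLoopA, pvTakeChunk, hb, pvFlatT, pvLoopB, List.append_assoc]
    | q :: rest =>
        by_cases hc : buf.length + p.toList.length + 1 < 300
        · -- p joins the running chunk
          have h3 : ¬ 300 ≤ (buf ++ p.toList ++ [' ']).length := by simp; omega
          have hlen : (buf ++ p.toList ++ [' ']).length = buf.length + p.toList.length + 1 := by
            simp; omega
          rw [show pvLoopA (p :: q :: rest) buf = pvLoopA (q :: rest) (buf ++ p.toList ++ [' '])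
            from by simp only [pvLoopA]; rw [if_neg h3]]
          rw [ih (buf ++ p.toList ++ [' ']) (by omega) (by simp), hlen]
          rw [show pvTakeChunk (p :: q :: rest) buf.length =
              (p.toList :: (pvTakeChunk (q :: rest) (buf.length + p.toList.length + 1)).1,
               (pvTakeChunk (q :: rest) (buf.length + p.toList.length + 1)).2)
            from by simp only [pvTakeChunk]; rw [if_pos hb]]
          simp [pvFlatT_cons, List.append_assoc]
        · -- chunk closes at p
          have h3 : 300 ≤ (buf ++ p.toList ++ [' ']).length := by simp; omega
          rw [show pvLoopA (p :: q :: rest) buf =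
              String.ofList (PySem.Chars.strip (buf ++ p.toList ++ [' '])) :: pvLoopA (q :: rest) []
            from by simp only [pvLoopA]; rw [if_pos h3]]
          rw [ih [] (by simp) (by simp)]
          rw [show pvTakeChunk (p :: q :: rest) buf.length = ([p.toList], q :: rest) from by
            simp only [pvTakeChunk]; rw [if_pos hb, if_neg hc]]
          rw [show pvLoopB (q :: rest) =
              String.ofList (PySem.Chars.strip
                  (PySem.Chars.join [' '] (pvTakeChunk (q :: rest) 0).1)) ::
                pvLoopB (pvTakeChunk (q :: rest) 0).2 from by rw [pvLoopB]]
          have hne : (pvTakeChunk (q :: rest) 0).1 ≠ [] := by simp [pvTakeChunk]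
          obtain ⟨x, xs, hx⟩ := List.exists_cons_of_ne_nil hne
          simp only [List.length_nil, List.nil_append, hx, pvFlatT_eq_join, pvStrip_append_space]
          simp only [PySem.Chars.join, List.intercalate, List.intersperse_single,
            List.flatten_cons, List.flatten_nil, List.append_nil]
          rw [← List.append_assoc, pvStrip_append_space]

lemma pvAeqLoopB (ps : List String) : pvLoopA ps [] = pvLoopB ps := by
  match ps with
  | [] => simp [pvLoopA, pvLoopB]
  | p :: rest =>
      rw [pvMain (p :: rest) [] (by simp) (by simp), pvLoopB]
      have hne : (pvTakeChunk (p :: rest) 0).1 ≠ [] := by simp [pvTakeChunk]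
      obtain ⟨x, xs, hx⟩ := List.exists_cons_of_ne_nil hne
      simp only [List.length_nil, List.nil_append, hx, pvFlatT_eq_join, pvStrip_append_space]

-- shape of one chunk: its parts are a prefix of the paragraph list, the rest the matching suffix
lemma pvTakeChunk_shape (ps : List String) : ∀ acc : Nat,
    (pvTakeChunk ps acc).1 = (ps.take (pvTakeChunk ps acc).1.length).map String.toList ∧
    (pvTakeChunk ps acc).2 = ps.drop (pvTakeChunk ps acc).1.length ∧
    (pvTakeChunk ps acc).1.length ≤ ps.length ∧
    (ps ≠ [] → acc < 300 → 1 ≤ (pvTakeChunk ps acc).1.length) := by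
  induction ps with
  | nil => intro acc; simp [pvTakeChunk]
  | cons p rest ih =>
      intro acc
      by_cases h : acc < 300
      · obtain ⟨h1, h2, h3, _⟩ := ih (acc + p.toList.length + 1)
        simp only [pvTakeChunk, if_pos h]
        refine ⟨?_, ?_, ?_, ?_⟩
        · simpa [List.take_succ_cons] using h1
        · simpa [List.drop_succ_cons] using h2
        · simpa using h3
        · intro _ _; simp
      · simp [pvTakeChunk, h]

-- the cut list of B's stage 2 follows the greedy chunks: either the list is exhausted below the
-- threshold (no cut emitted), or the first cut is the end of the first chunk
lemma pvCuts_step (ps : List String) : ∀ (i acc : Nat), acc < 300 →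
    ((pvTakeChunk ps acc).2 = [] ∧ pvCutsB (ps.map (fun p => p.toList.length + 1)) i acc = []) ∨
    pvCutsB (ps.map (fun p => p.toList.length + 1)) i acc =
      (i + (pvTakeChunk ps acc).1.length) ::
        pvCutsB ((pvTakeChunk ps acc).2.map (fun p => p.toList.length + 1))
          (i + (pvTakeChunk ps acc).1.length) 0 := by
  induction ps with
  | nil => intro i acc _; left; simp [pvTakeChunk, pvCutsB]
  | cons p rest ih =>
      intro i acc hacc
      have hAcc : acc + (p.toList.length + 1) = acc + p.toList.length + 1 := by omega
      by_cases hc : 300 ≤ acc + (p.toList.length + 1)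
      · right
        have hlt : ¬ (acc + p.toList.length + 1 < 300) := by omega
        have ht : pvTakeChunk (p :: rest) acc = ([p.toList], rest) := by
          simp only [pvTakeChunk, if_pos hacc]
          have hrest : pvTakeChunk rest (acc + p.toList.length + 1) = ([], rest) := by
            cases rest with
            | nil => rfl
            | cons q t => simp only [pvTakeChunk]; rw [if_neg hlt]
          rw [hrest]
        rw [ht]
        simp only [List.map_cons, pvCutsB, if_pos hc]
        norm_num
      · have ht : pvTakeChunk (p :: rest) acc =
            (p.toList :: (pvTakeChunk rest (acc + p.toList.length + 1)).1,
             (pvTakeChunk rest (acc + p.toList.length + 1)).2) := by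
          simp only [pvTakeChunk]; rw [if_pos hacc]
        have hstep : pvCutsB ((p :: rest).map (fun p => p.toList.length + 1)) i acc =
            pvCutsB (rest.map (fun p => p.toList.length + 1)) (i + 1)
              (acc + p.toList.length + 1) := by
          simp only [List.map_cons, pvCutsB]; rw [if_neg hc, hAcc]
        rcases ih (i + 1) (acc + p.toList.length + 1) (by omega) with ⟨h1, h2⟩ | h
        · left
          refine ⟨?_, ?_⟩
          · rw [ht]; exact h1
          · rw [hstep]; exact h2
        · right
          have hidx : i + 1 + (pvTakeChunk rest (acc + p.toList.length + 1)).1.length =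
              i + ((pvTakeChunk rest (acc + p.toList.length + 1)).1.length + 1) := by omega
          rw [hstep, h, hidx]
          simp only [ht, List.length_cons]

lemma pvFix_cons (e : Nat) (cs : List Nat) (n : Nat) (h : cs = [] → e ≠ n) :
    pvFix (e :: cs) n = e :: pvFix cs n := by
  cases cs with
  | nil => simp [pvFix, h rfl]
  | cons c t =>
      simp only [pvFix, List.getLast?_cons_cons]
      split <;> simp

-- the fixed-up cut list equals the list of greedy chunk endpoints
lemma pvFix_cuts_eq (N : Nat) : ∀ (ps : List String) (i : Nat), ps.length ≤ N → ps ≠ [] →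
    pvFix (pvCutsB (ps.map (fun p => p.toList.length + 1)) i 0) (i + ps.length) =
      (i + (pvTakeChunk ps 0).1.length) ::
        (if (pvTakeChunk ps 0).2 = [] then []
         else pvFix (pvCutsB ((pvTakeChunk ps 0).2.map (fun p => p.toList.length + 1))
                (i + (pvTakeChunk ps 0).1.length) 0)
              ((i + (pvTakeChunk ps 0).1.length) + (pvTakeChunk ps 0).2.length)) := by
  induction N with
  | zero => intro ps i h hne; exact absurd (List.eq_nil_of_length_eq_zero (by omega)) hne
  | succ N ihN =>
    intro ps i hlen hne
    obtain ⟨_, h2, h3, h4⟩ := pvTakeChunk_shape ps 0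
    have hk1 : 1 ≤ (pvTakeChunk ps 0).1.length := h4 hne (by omega)
    have hrl : (pvTakeChunk ps 0).2.length = ps.length - (pvTakeChunk ps 0).1.length := by
      rw [h2]; simp
    rcases pvCuts_step ps i 0 (by omega) with ⟨hr, hc⟩ | hc
    · -- exhausted below threshold: no cut, fixup appends the total length
      have hkn : (pvTakeChunk ps 0).1.length = ps.length := by
        have := congrArg List.length h2
        simp [hr] at this
        omega
      rw [hc, hr]
      simp [pvFix, hkn]
    · rw [hc]
      by_cases hr : (pvTakeChunk ps 0).2 = []
      · -- chunk closed exactly at the end of the list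
        have hkn : (pvTakeChunk ps 0).1.length = ps.length := by
          have := congrArg List.length h2
          simp [hr] at this
          omega
        rw [hr]
        simp [pvFix, hkn, pvCutsB]
      · -- a later chunk exists
        rw [pvFix_cons _ _ _ (fun _ => by
            have h0 : 0 < (pvTakeChunk ps 0).2.length := List.length_pos_of_ne_nil hr
            omega)]
        rw [if_neg hr]
        have : i + ps.length = (i + (pvTakeChunk ps 0).1.length) + (pvTakeChunk ps 0).2.length := by
          omega
        rw [this]
  -- note: the recursive pvFix on the tail is not unfolded further here; pvEmit_eq consumes it

-- stage 3 on the chunk endpoints reproduces the chunk-by-chunk reference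
lemma pvEmit_eq (N : Nat) : ∀ (ps suf : List String) (i : Nat), suf.length ≤ N →
    suf = ps.drop i → suf ≠ [] →
    pvEmit ps (pvFix (pvCutsB (suf.map (fun p => p.toList.length + 1)) i 0) (i + suf.length)) i =
      pvLoopB suf := by
  induction N with
  | zero => intro ps suf i h hdrop hne; exact absurd (List.eq_nil_of_length_eq_zero (by omega)) hne
  | succ N ihN =>
    intro ps suf i hlen hdrop hne
    obtain ⟨h1, h2, h3, h4⟩ := pvTakeChunk_shape suf 0
    have hk1 : 1 ≤ (pvTakeChunk suf 0).1.length := h4 hne (by omega)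
    set k := (pvTakeChunk suf 0).1.length with hk
    rw [pvFix_cuts_eq suf.length suf i (le_refl _) hne]
    simp only [← hk]
    have hslice : pvSliceJoin ps i (i + k) =
        String.ofList (PySem.Chars.strip (PySem.Chars.join [' '] (pvTakeChunk suf 0).1)) := by
      unfold pvSliceJoin
      rw [PySem.List.slice_natCast ps i (i + k), Nat.add_sub_cancel_left, ← hdrop, ← h1]
    rw [show pvLoopB suf = String.ofList (PySem.Chars.strip
          (PySem.Chars.join [' '] (pvTakeChunk suf 0).1)) :: pvLoopB (pvTakeChunk suf 0).2 from by
        obtain ⟨p, rest, rfl⟩ := List.exists_cons_of_ne_nil hne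
        rw [pvLoopB]]
    by_cases hr : (pvTakeChunk suf 0).2 = []
    · rw [if_pos hr, hr]
      simp only [pvEmit, hslice, pvLoopB]
    · rw [if_neg hr]
      simp only [pvEmit, hslice]
      congr 1
      have hdrop' : (pvTakeChunk suf 0).2 = ps.drop (i + k) := by
        rw [h2, hdrop, List.drop_drop]
      have hlt : (pvTakeChunk suf 0).2.length ≤ N := by
        have : (pvTakeChunk suf 0).2.length = suf.length - k := by rw [h2]; simp
        omega
      exact ihN ps (pvTakeChunk suf 0).2 (i + k) hlt hdrop' hr

lemma pvLoopB_eq_alt (ps : List String) (hne : ps ≠ []) :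
    pvLoopB ps = pvEmit ps (pvFix (pvCutsB (ps.map (fun p => p.toList.length + 1)) 0 0) ps.length) 0 := by
  have := pvEmit_eq ps.length ps ps 0 (le_refl _) (by simp) hne
  simpa using this.symm

lemma pvFilter_eq (paragraphs : List String) :
    paragraphs.filter (fun p => decide (p ≠ "") && decide (¬ (p = "<br/>" ∨ p = ""))) =
      paragraphs.filter (fun p => decide (p ≠ "") && decide (p ≠ "<br/>")) := by
  apply List.filter_congr
  intro x _
  by_cases h1 : x = "" <;> by_cases h2 : x = "<br/>" <;> simp [h1, h2]

-- ===== VERDICT (by name: the statement is the Claim_ definition above) =====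
theorem optimize_paragraphs_spec : Claim_equal_optimize_paragraphs := by
  intro paragraphs _
  show optimize_paragraphs paragraphs = optimize_paragraphs_alt paragraphs
  unfold optimize_paragraphs optimize_paragraphs_alt
  rw [pvFilter_eq, pvAeqLoopB]
  set ps := paragraphs.filter (fun p => decide (p ≠ "") && decide (p ≠ "<br/>")) with hps
  by_cases h : ps.isEmpty
  · rw [if_pos h]
    rw [List.isEmpty_iff] at h
    rw [h, pvLoopB]
  · rw [if_neg h]
    rw [List.isEmpty_iff] at h
    exact pvLoopB_eq_alt ps h
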